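-- pv_equiv track=rewrite | github.com/nicta839/MSc_Statistics_and_Machine_Learning | Introduction to Python 732A74/LAB4/text_stats.py | get_most_followed_words
-- ===== SOURCE A (Python) =====
-- import collections, re
--
-- def get_most_followed_words(words, number_words):
--     most_common_words_following = {}
--     for ind, word in enumerate(words):
--         if ind+1 < number_words:
--             if word in most_common_words_following.keys():
--                 most_common_words_following[word].append(words[ind+1])
--             else:
--                 most_common_words_following[word] = [words[ind+1]]
--
--     for key, successors in most_common_words_following.items():
--         most_common_words_following[key] = collections.Counter(successors).most_common()
--     return most_common_words_following
-- ===== SOURCE B (Python) =====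
-- import collections
--
--
-- def get_most_followed_words(words, number_words):
--     # count every leading bigram once, globally, then group by first word and sort
--     n = len(words)
--     k = min(number_words, n) if number_words > 0 else 0
--     bigrams = [(words[i], words[i + 1]) for i in range(k - 1)]
--     pair_counts = collections.Counter(bigrams)
--     grouped = {}
--     for (word, nxt), count in pair_counts.items():
--         grouped[word] = grouped.get(word, []) + [(nxt, count)]
--     return {w: sorted(lst, key=lambda t: t[1], reverse=True) for w, lst in grouped.items()}
-- ===== Notes on version B (the rewrite author's own statement) =====
-- stated objective: alternative
-- what changed: Instead of A's dict of per-word successor lists followed by a Counter per word, B counts each leading bigram once in a single global Counter and then groups its distinct (word, successor) entries by first word, sorting each group by count descending.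
-- outside the precondition, e.g. on get_most_followed_words(['a', 'b'], 5): A raises IndexError, B returns {'a': [('b', 1)]}
import Mathlib
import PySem

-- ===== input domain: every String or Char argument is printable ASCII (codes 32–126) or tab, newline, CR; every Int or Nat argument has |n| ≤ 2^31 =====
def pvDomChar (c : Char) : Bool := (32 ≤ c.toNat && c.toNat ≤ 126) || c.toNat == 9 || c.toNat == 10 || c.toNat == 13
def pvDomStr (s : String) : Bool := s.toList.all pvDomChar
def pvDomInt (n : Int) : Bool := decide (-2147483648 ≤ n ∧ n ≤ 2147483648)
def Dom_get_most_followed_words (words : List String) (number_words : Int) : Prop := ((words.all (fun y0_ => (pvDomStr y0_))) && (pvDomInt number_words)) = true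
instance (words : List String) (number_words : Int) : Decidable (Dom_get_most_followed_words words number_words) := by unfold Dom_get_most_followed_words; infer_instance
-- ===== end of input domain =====

-- B replaces A's per-word successor-list dict plus a Counter per word by one global
-- bigram Counter whose distinct (word, successor) entries are then grouped by first
-- word and each group sorted by count (objective: alternative decomposition).

-- ===== PORT A =====
def get_most_followed_words (words : List String) (number_words : Int) : List (String × List (String × Int)) :=
  let d := (PySem.List.enumerate words).foldl
    (fun d p =>
      if p.1 + 1 < number_words then
        if d.contains p.2 then d.modify p.2 [] (fun l => l ++ [PySem.List.pyGetD words (p.1 + 1) ""])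
        else d.insert p.2 [PySem.List.pyGetD words (p.1 + 1) ""]
      else d)
    PySem.Dict.empty
  -- Counter(successors).most_common() = counts sorted descending, stable (first-insertion tie order)
  d.items.map (fun kv => (kv.1, PySem.List.sorted (PySem.Dict.counter kv.2).items (fun q => q.2) true))

-- ===== PORT B =====
def get_most_followed_words_alt (words : List String) (number_words : Int) : List (String × List (String × Int)) :=
  let n : Int := PySem.List.len words
  let k : Int := if number_words > 0 then min number_words n else 0
  let bigrams := (PySem.List.pyRange 0 (k - 1)).map
    (fun i => (PySem.List.pyGetD words i "", PySem.List.pyGetD words (i + 1) ""))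
  let pair_counts := PySem.Dict.counter bigrams
  let grouped := pair_counts.items.foldl
    (fun g kv => g.insert kv.1.1 (g.getD kv.1.1 [] ++ [(kv.1.2, kv.2)]))
    PySem.Dict.empty
  grouped.items.map (fun kv => (kv.1, PySem.List.sorted kv.2 (fun t => t.2) true))

-- ===== PRECONDITION & SPEC =====
-- A indexes words[ind+1] whenever ind+1 < number_words, so it raises IndexError iff
-- words is nonempty and number_words exceeds len(words); exactly those inputs are excluded.
def Pre_get_most_followed_words (words : List String) (number_words : Int) : Prop :=
  words = [] ∨ number_words ≤ (words.length : Int)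
instance (words : List String) (number_words : Int) : Decidable (Pre_get_most_followed_words words number_words) := by unfold Pre_get_most_followed_words; infer_instance
def pvWitness_get_most_followed_words : List String × Int := (["a", "b", "a", "b"], 4)

def Spec_get_most_followed_words (words : List String) (number_words : Int) (out : List (String × List (String × Int))) : Prop := out = get_most_followed_words_alt words number_words
instance (words : List String) (number_words : Int) (out : List (String × List (String × Int))) : Decidable (Spec_get_most_followed_words words number_words out) := by unfold Spec_get_most_followed_words; infer_instance

-- ===== CLAIM (what is proved, stated in full; the proofs are below) =====
def Claim_equal_get_most_followed_words : Prop := ∀ (words : List String) (number_words : Int), Dom_get_most_followed_words words number_words → Pre_get_most_followed_words words number_words → Spec_get_most_followed_words words number_words (get_most_followed_words words number_words)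
-- ===== LEMMAS AND PROOFS =====

-- the list of (word, successor) bigrams both programs effectively process
def pvPairs (words : List String) (number_words : Int) : List (String × String) :=
  (words.zip words.tail).take (number_words - 1).toNat

-- the loop shape both sides reduce to: append the pair's payload under its key
def pvGrow {ν : Type} (d : PySem.Dict String (List ν)) (p : String × ν) : PySem.Dict String (List ν) :=
  d.modify p.1 [] (fun l => l ++ [p.2])

def pvFold {ν : Type} (l : List (String × ν)) : PySem.Dict String (List ν) :=
  l.foldl pvGrow PySem.Dict.empty

lemma pvFold_keys {ν : Type} (l : List (String × ν)) :
    (pvFold l).keys = PySem.List.dedup (l.map Prod.fst) := by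
  have h : (pvFold l).keys = PySem.Set.update PySem.Dict.empty.keys (l.map Prod.fst) :=
    PySem.Dict.keys_foldl_modify_key l Prod.fst ([] : List ν)
      (fun _ x => (fun t => t ++ [x.2])) PySem.Dict.empty
  rw [h, PySem.Dict.keys_empty, PySem.List.dedup_eq_ofList, PySem.Set.ofList_eq_foldl]
  rfl

lemma pvFold_nodup {ν : Type} (l : List (String × ν)) : (pvFold l).keys.Nodup := by
  exact PySem.Dict.nodup_keys_foldl_modify_key l Prod.fst ([] : List ν)
    (fun _ x => (fun t => t ++ [x.2])) PySem.Dict.empty PySem.Dict.nodup_keys_empty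

lemma pvFold_getD {ν : Type} (l : List (String × ν)) (w : String) :
    (pvFold l).getD w [] = (l.filter (fun p => p.1 == w)).map (fun p => p.2) := by
  have h : (pvFold l).getD w [] = PySem.Dict.empty.getD w []
      ++ (l.filter (fun p => p.1 == w)).map (fun p => p.2) :=
    PySem.Dict.getD_foldl_modify_append l PySem.Dict.empty w
  rw [h, PySem.Dict.getD_empty, List.nil_append]

lemma pvFold_items {ν : Type} (l : List (String × ν)) :
    (pvFold l).items = (PySem.List.dedup (l.map Prod.fst)).map
      (fun w => (w, (l.filter (fun p => p.1 == w)).map (fun p => p.2))) := by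
  rw [PySem.Dict.items_eq_map_keys (pvFold l) (pvFold_nodup l) [], pvFold_keys]
  exact List.map_congr_left (fun w _ => by rw [pvFold_getD])

-- ofList over an appended element
lemma pvOfList_concat {α : Type} [BEq α] [LawfulBEq α] (l : List α) (x : α) :
    PySem.Set.ofList (l ++ [x]) =
      if x ∈ l then PySem.Set.ofList l else PySem.Set.ofList l ++ [x] := by
  rw [PySem.Set.ofList_eq_foldl, List.foldl_append, ← PySem.Set.ofList_eq_foldl]
  show PySem.Set.add (PySem.Set.ofList l) x = _
  rw [PySem.Set.add]
  by_cases h : x ∈ l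
  · rw [if_pos h, if_pos]
    show List.elem x _ = true
    rw [List.elem_eq_contains, List.contains_iff_mem]
    exact (PySem.Set.mem_ofList l x).mpr h
  · rw [if_neg h, if_neg]
    show ¬ List.elem x _ = true
    rw [List.elem_eq_contains, List.contains_iff_mem]
    exact fun hc => h ((PySem.Set.mem_ofList l x).mp hc)

-- deduplicating after a map absorbs an inner dedup
lemma pvOfList_map_ofList {α β : Type} [BEq α] [LawfulBEq α] [BEq β] [LawfulBEq β]
    (f : α → β) (l : List α) :
    PySem.Set.ofList ((PySem.Set.ofList l).map f) = PySem.Set.ofList (l.map f) := by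
  induction l using List.reverseRecOn with
  | nil => rfl
  | append_singleton t x ih =>
    rw [pvOfList_concat t x]
    by_cases hx : x ∈ t
    · rw [if_pos hx, ih, List.map_append, List.map_singleton, pvOfList_concat, if_pos]
      exact List.mem_map_of_mem hx
    · rw [if_neg hx, List.map_append, List.map_singleton, pvOfList_concat, List.map_append,
        List.map_singleton, pvOfList_concat]
      by_cases hf : f x ∈ t.map f
      · rw [if_pos, if_pos hf, ih]
        rw [List.mem_map]
        obtain ⟨a, ha, hfa⟩ := List.mem_map.mp hf
        exact ⟨a, (PySem.Set.mem_ofList t a).mpr ha, hfa⟩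
      · rw [if_neg, if_neg hf, ih]
        rw [List.mem_map]
        rintro ⟨a, ha, hfa⟩
        exact hf (List.mem_map.mpr ⟨a, (PySem.Set.mem_ofList t a).mp ha, hfa⟩)

-- dedup commutes with filter
lemma pvOfList_filter {α : Type} [BEq α] [LawfulBEq α] (p : α → Bool) (l : List α) :
    PySem.Set.ofList (l.filter p) = (PySem.Set.ofList l).filter p := by
  induction l using List.reverseRecOn with
  | nil => rfl
  | append_singleton t x ih =>
    rw [List.filter_append, pvOfList_concat t x]
    cases hp : p x
    · have hs : List.filter p [x] = [] := by simp [hp]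
      rw [hs, List.append_nil, ih]
      by_cases hx : x ∈ t
      · rw [if_pos hx]
      · rw [if_neg hx, List.filter_append]
        have : List.filter p [x] = [] := by simp [hp]
        rw [this, List.append_nil]
    · have hs : List.filter p [x] = [x] := by simp [hp]
      rw [hs]
      by_cases hx : x ∈ t
      · rw [if_pos hx, pvOfList_concat, if_pos (List.mem_filter.mpr ⟨hx, hp⟩), ih]
      · rw [if_neg hx, pvOfList_concat,
          if_neg (fun hc => hx (List.mem_filter.mp hc).1), ih, List.filter_append, hs]

-- on a list whose first components are all w, dedup commutes with the snd projection
lemma pvOfList_map_snd {β : Type} [BEq β] [LawfulBEq β] (w : String) (l : List (String × β))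
    (h : ∀ x ∈ l, x.1 = w) :
    PySem.Set.ofList (l.map Prod.snd) = (PySem.Set.ofList l).map Prod.snd := by
  induction l using List.reverseRecOn with
  | nil => rfl
  | append_singleton t x ih =>
    have ht : ∀ y ∈ t, y.1 = w := fun y hy => h y (List.mem_append_left _ hy)
    have hx1 : x.1 = w := h x (List.mem_append_right _ (List.mem_singleton_self x))
    rw [List.map_append, List.map_singleton, pvOfList_concat, pvOfList_concat t x]
    by_cases hm : x ∈ t
    · rw [if_pos hm, if_pos (List.mem_map_of_mem hm)]
      exact ih ht
    · rw [if_neg hm, if_neg, List.map_append, List.map_singleton, ih ht]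
      rw [List.mem_map]
      rintro ⟨a, ha, h2⟩
      have : a = x := Prod.ext ((ht a ha).trans hx1.symm) h2
      exact hm (this ▸ ha)

-- counting a pair in a constant-fst list = counting its second component
lemma pvCount_pair {β : Type} [BEq β] [LawfulBEq β] (w : String) (l : List (String × β))
    (h : ∀ x ∈ l, x.1 = w) (n : β) :
    l.count (w, n) = (l.map Prod.snd).count n := by
  induction l with
  | nil => rfl
  | cons y t ih =>
    have hy : y.1 = w := h y (List.mem_cons_self)
    have ht : ∀ x ∈ t, x.1 = w := fun x hx => h x (List.mem_cons_of_mem y hx)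
    rw [List.map_cons, List.count_cons, List.count_cons, ih ht]
    congr 1
    have : (y == (w, n)) = (y.2 == n) := by
      cases y with
      | mk a b =>
        simp only at hy
        subst hy
        show ((a, b) == (a, n)) = (b == n)
        simp only [beq_eq_beq, Prod.mk.injEq, true_and]
    rw [this]

-- A's per-word successor list
def pvSucc (ps : List (String × String)) (w : String) : List String :=
  (ps.filter (fun p => p.1 == w)).map (fun p => p.2)

-- the grouped value B computes for key w equals Counter(pvSucc).items
lemma pvVal_eq (ps : List (String × String)) (w : String) :
    ((((PySem.Dict.counter ps).items.map
        (fun x : (String × String) × Int => (x.1.1, (x.1.2, x.2)))).filter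
        (fun p => p.1 == w)).map (fun p => p.2))
      = (PySem.Dict.counter (pvSucc ps w)).items := by
  rw [PySem.Dict.items_counter, List.map_map, List.filter_map, List.map_map]
  have hcomp : ((fun p : String × String × Int => p.1 == w) ∘
      ((fun x : (String × String) × Int => (x.1.1, x.1.2, x.2)) ∘
        (fun k : String × String => (k, (ps.count k : Int)))))
      = (fun p : String × String => p.1 == w) := rfl
  rw [hcomp, ← pvOfList_filter]
  have hmem : ∀ x ∈ PySem.Set.ofList (ps.filter (fun p => p.1 == w)),
      x ∈ ps.filter (fun p => p.1 == w) := fun x hx => (PySem.Set.mem_ofList _ x).mp hx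
  have hfst : ∀ x ∈ ps.filter (fun p => p.1 == w), x.1 = w :=
    fun x hx => of_decide_eq_true ((List.mem_filter.mp hx).2)
  have hcongr : ∀ x ∈ PySem.Set.ofList (ps.filter (fun p => p.1 == w)),
      (((fun p : String × String × Int => p.2) ∘
        ((fun x : (String × String) × Int => (x.1.1, x.1.2, x.2)) ∘
          (fun k : String × String => (k, (ps.count k : Int))))) x)
      = ((fun n : String => (n, ((pvSucc ps w).count n : Int))) ∘ Prod.snd) x := by
    intro x hx
    have hxf := hmem x hx
    have hx1 : x.1 = w := hfst x hxf
    show (x.2, (ps.count x : Int)) = (x.2, ((pvSucc ps w).count x.2 : Int))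
    have h1 : (ps.filter (fun p => p.1 == w)).count x = ps.count x :=
      List.count_filter (by rw [hx1]; exact beq_self_eq_true w)
    have h2 : (ps.filter (fun p => p.1 == w)).count x = (pvSucc ps w).count x.2 := by
      have hc := pvCount_pair w (ps.filter (fun p => p.1 == w)) hfst x.2
      rw [pvSucc, ← hc]
      congr 1
      exact Prod.ext hx1 rfl
    rw [← h1, h2]
  rw [List.map_congr_left hcongr, ← List.map_map, PySem.Dict.items_counter,
    ← pvOfList_map_snd w _ hfst]
  rfl

-- indices in enumerate are increasing, so A's guard keeps exactly a prefix
lemma pvEnum_filter_nil (ws : List String) (s nw : Int) (h : nw ≤ s + 1) :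
    (PySem.List.enumerate ws s).filter (fun p => decide (p.1 + 1 < nw)) = [] := by
  rw [List.filter_eq_nil_iff]
  intro p hp
  rcases (PySem.List.mem_enumerate_iff _ _ _).1 hp with ⟨k, hk, rfl⟩
  simp only [decide_eq_true_eq]
  omega

lemma pvEnum_filter_take (ws : List String) (s nw : Int) :
    (PySem.List.enumerate ws s).filter (fun p => decide (p.1 + 1 < nw))
      = (PySem.List.enumerate ws s).take (nw - s - 1).toNat := by
  induction ws generalizing s with
  | nil => simp [PySem.List.enumerate_nil]
  | cons x t ih =>
    rw [PySem.List.enumerate_cons]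
    by_cases h : s + 1 < nw
    · have ht : (nw - s - 1).toNat = (nw - (s + 1) - 1).toNat + 1 := by omega
      rw [List.filter_cons_of_pos (by simpa using h), ih (s + 1), ht, List.take_succ_cons]
    · rw [List.filter_cons_of_neg (by simpa using h), pvEnum_filter_nil t (s + 1) nw (by omega)]
      have : (nw - s - 1).toNat = 0 := by omega
      simp [this]

-- the elements A's guarded loop really processes are exactly pvPairs
lemma pvEnumMap_eq_pairs (words : List String) (nw : Int)
    (hpre : words = [] ∨ nw ≤ (words.length : Int)) :
    ((PySem.List.enumerate words).take (nw - 1).toNat).map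
        (fun p => (p.2, PySem.List.pyGetD words (p.1 + 1) ""))
      = pvPairs words nw := by
  rcases hpre with rfl | hle
  · simp [pvPairs, PySem.List.enumerate_nil]
  · apply List.ext_getElem
    · simp only [List.length_map, List.length_take, PySem.List.length_enumerate, pvPairs,
        List.length_zip, List.length_tail]
      omega
    · intro i h1 h2
      have hi : i < (nw - 1).toNat := by
        simpa only [List.length_map, List.length_take, PySem.List.length_enumerate] using
          lt_of_lt_of_le h1 (by simp)
      have hiw : i + 1 < words.length := by
        simp only [List.length_map, List.length_take, PySem.List.length_enumerate] at h1
        omega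
      have he : i < (PySem.List.enumerate words 0).length := by
        simp [PySem.List.length_enumerate]; omega
      simp only [List.getElem_map, List.getElem_take, PySem.List.getElem_enumerate,
        pvPairs, List.getElem_zip, List.getElem_tail]
      have hcast : (0 : Int) + (i : Int) + 1 = ((i + 1 : Nat) : Int) := by push_cast; ring
      rw [hcast, PySem.List.pyGetD_natCast]
      simp [List.getD_eq_getElem?_getD, hiw]

-- A's loop, rewritten as pvFold over pvPairs
lemma pvLoopA (words : List String) (nw : Int)
    (hpre : words = [] ∨ nw ≤ (words.length : Int)) :
    (PySem.List.enumerate words).foldl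
      (fun d p =>
        if p.1 + 1 < nw then
          if d.contains p.2 then d.modify p.2 [] (fun l => l ++ [PySem.List.pyGetD words (p.1 + 1) ""])
          else d.insert p.2 [PySem.List.pyGetD words (p.1 + 1) ""]
        else d)
      PySem.Dict.empty
    = pvFold (pvPairs words nw) := by
  have hstep : ∀ (d : PySem.Dict String (List String)) (q : Int × String),
      (if d.contains q.2 then d.modify q.2 [] (fun l => l ++ [PySem.List.pyGetD words (q.1 + 1) ""])
       else d.insert q.2 [PySem.List.pyGetD words (q.1 + 1) ""])
      = pvGrow d (q.2, PySem.List.pyGetD words (q.1 + 1) "") := by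
    intro d q
    rw [pvGrow]
    by_cases h : d.contains q.2 = true
    · rw [if_pos h]
    · rw [if_neg h]
      show d.insert q.2 _ = d.insert q.2 _
      rw [PySem.Dict.getD_of_not_contains d [] (by simpa using h)]
      rfl
  rw [PySem.List.foldl_ite_eq_foldl_filter (fun q : ℤ × String => q.1 + 1 < nw)
      (fun (d : PySem.Dict String (List String)) (q : ℤ × String) =>
        if d.contains q.2 then d.modify q.2 [] (fun l => l ++ [PySem.List.pyGetD words (q.1 + 1) ""])
        else d.insert q.2 [PySem.List.pyGetD words (q.1 + 1) ""])]
  rw [pvEnum_filter_take words 0 nw]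
  have h0 : (nw - 0 - 1).toNat = (nw - 1).toNat := by omega
  rw [h0]
  have hr : pvFold (pvPairs words nw)
      = ((PySem.List.enumerate words).take (nw - 1).toNat).foldl
          (fun d q => pvGrow d (q.2, PySem.List.pyGetD words (q.1 + 1) "")) PySem.Dict.empty := by
    rw [← pvEnumMap_eq_pairs words nw hpre, pvFold, List.foldl_map]
  rw [hr]
  exact PySem.List.foldl_congr_mem _ _ _ _ (fun d q _ => hstep d q)

-- B's bigram list equals pvPairs under the precondition
lemma pvBigrams_eq_pairs (words : List String) (nw : Int)
    (hpre : words = [] ∨ nw ≤ (words.length : Int)) :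
    (PySem.List.pyRange 0 ((if nw > 0 then min nw (PySem.List.len words) else 0) - 1)).map
        (fun i => (PySem.List.pyGetD words i "", PySem.List.pyGetD words (i + 1) ""))
      = pvPairs words nw := by
  by_cases hpos : nw > 0
  · rw [if_pos hpos]
    rcases hpre with rfl | hle
    · have : min nw (PySem.List.len ([] : List String)) = 0 := by
        simp only [PySem.List.len_eq, List.length_nil, Nat.cast_zero]
        omega
      rw [this]
      have h1 : PySem.List.pyRange 0 (0 - 1) = [] := by decide
      rw [h1]
      simp [pvPairs]
    · have hmin : min nw (PySem.List.len words) = nw := by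
        simp only [PySem.List.len_eq]
        omega
      rw [hmin]
      have hm : nw - 1 = ((nw - 1).toNat : Int) := by omega
      rw [hm, PySem.List.pyRange_zero_natCast]
      apply List.ext_getElem
      · simp only [List.length_map, List.length_range, pvPairs, List.length_take,
          List.length_zip, List.length_tail]
        omega
      · intro i h1 h2
        have him : i < (nw - 1).toNat := by
          simpa only [List.length_map, List.length_range] using h1
        have hiw : i + 1 < words.length := by omega
        simp only [List.getElem_map, List.getElem_range, pvPairs, List.getElem_take,
          List.getElem_zip, List.getElem_tail]
        have hc : ((i : Int) + 1) = ((i + 1 : Nat) : Int) := by push_cast; ring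
        rw [PySem.List.pyGetD_natCast, hc, PySem.List.pyGetD_natCast]
        simp [List.getD_eq_getElem?_getD, hiw, Nat.lt_of_succ_lt hiw]
  · rw [if_neg hpos]
    have h1 : PySem.List.pyRange 0 (0 - 1) = [] := by decide
    rw [h1]
    have : (nw - 1).toNat = 0 := by omega
    simp [pvPairs, this]

-- ===== VERDICT (by name: the statement is the Claim_ definition above) =====
theorem get_most_followed_words_spec : Claim_equal_get_most_followed_words := by
  intro words nw _ hpre
  show get_most_followed_words words nw = get_most_followed_words_alt words nw
  rw [get_most_followed_words, get_most_followed_words_alt]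
  rw [pvLoopA words nw hpre, pvBigrams_eq_pairs words nw hpre]
  -- B's grouping loop is pvFold over the decorated counter items
  have hB : (PySem.Dict.counter (pvPairs words nw)).items.foldl
      (fun g kv => g.insert kv.1.1 (g.getD kv.1.1 [] ++ [(kv.1.2, kv.2)]))
      PySem.Dict.empty
      = pvFold ((PySem.Dict.counter (pvPairs words nw)).items.map
          (fun x => (x.1.1, (x.1.2, x.2)))) := by
    rw [pvFold, List.foldl_map]
    rfl
  rw [hB, pvFold_items, pvFold_items]
  -- same key lists
  have hkeys : PySem.List.dedup (((PySem.Dict.counter (pvPairs words nw)).items.map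
        (fun x : (String × String) × Int => (x.1.1, (x.1.2, x.2)))).map Prod.fst)
      = PySem.List.dedup ((pvPairs words nw).map Prod.fst) := by
    rw [List.map_map, PySem.Dict.items_counter, List.map_map]
    have : ((Prod.fst ∘ fun x : (String × String) × Int => (x.1.1, x.1.2, x.2)) ∘
        fun k : String × String => (k, ((pvPairs words nw).count k : Int))) = Prod.fst := rfl
    rw [this, PySem.List.dedup_eq_ofList, PySem.List.dedup_eq_ofList,
      pvOfList_map_ofList]
  rw [List.map_map, List.map_map, hkeys]
  exact List.map_congr_left (fun w _ => by
    simp only [Function.comp_apply]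
    rw [pvVal_eq]
    rfl)
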